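-- pv_equiv track=rewrite | github.com/sylgas/HistoricalSocialNetworkAnalysis | src/visualisation/graph.py | __build_node_group_list
-- ===== SOURCE A (Python) =====
-- def __build_node_group_list(groups):
--     node_group_list = dict()
--     index = 0
--     for group in groups:
--         index += 1
--         for node in group:
--             if node not in node_group_list:
--                 node_group_list[node] = str(index)
--             else:
--                 node_group_list[node] += (', ' + str(index))
--     return node_group_list
-- ===== SOURCE B (Python) =====
-- def __build_node_group_list(groups):
--     nodes = dict.fromkeys(node for group in groups for node in group)
--     return {node: ', '.join(str(i) for i, group in enumerate(groups, 1)
--                             for x in group if x == node)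
--             for node in nodes}
-- ===== Notes on version B (the rewrite author's own statement) =====
-- stated objective: alternative
-- what changed: B inverts the traversal: it first computes the distinct nodes in first-occurrence order with dict.fromkeys over the flattened groups, then for each node independently scans enumerate(groups, 1) collecting the matching 1-based indices and joins them once, instead of A's single pass over groups maintaining a mutable dict and growing each node's string by repeated concatenation.
import Mathlib
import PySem

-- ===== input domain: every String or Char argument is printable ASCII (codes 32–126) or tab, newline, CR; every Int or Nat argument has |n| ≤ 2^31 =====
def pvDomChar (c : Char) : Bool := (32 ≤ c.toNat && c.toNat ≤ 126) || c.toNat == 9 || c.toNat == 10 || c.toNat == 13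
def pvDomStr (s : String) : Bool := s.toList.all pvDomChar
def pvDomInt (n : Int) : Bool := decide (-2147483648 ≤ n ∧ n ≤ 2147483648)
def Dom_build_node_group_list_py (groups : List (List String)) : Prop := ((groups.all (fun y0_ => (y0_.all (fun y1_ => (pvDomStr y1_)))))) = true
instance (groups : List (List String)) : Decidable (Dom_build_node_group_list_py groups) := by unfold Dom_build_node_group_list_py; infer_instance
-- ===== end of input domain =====

-- B inverts the traversal: distinct nodes first (dict.fromkeys over the flattened groups),
-- then a per-node scan of enumerate(groups, 1) collecting that node's 1-based indices,
-- joined once — instead of A's single mutable-dict pass with incremental string growth;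
-- objective: alternative. String values are handled as List Char internally, exact on the ASCII domain.

-- ===== PORT A =====
def build_node_group_list_py (groups : List (List String)) : List (String × String) :=
  let st := groups.foldl
    (fun (st : PySem.Dict String (List Char) × Int) group =>
      let index := st.2 + 1
      let d := group.foldl
        (fun d node =>
          match d.get? node with
          | none => d.insert node (PySem.Int.toChars index)        -- node not in dict
          | some s => d.insert node (s ++ (", ".toList ++ PySem.Int.toChars index)))  -- += ', ' + str(index)
        st.1
      (d, index))
    (PySem.Dict.empty, 0)
  st.1.items.map (fun p => (p.1, String.ofList p.2))

-- ===== PORT B =====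
def build_node_group_list_py_alt (groups : List (List String)) : List (String × String) :=
  -- nodes = dict.fromkeys(node for group in groups for node in group)
  let nodes := PySem.List.dedup (groups.flatMap (fun g => g))
  -- per node: ', '.join(str(i) for i, group in enumerate(groups, 1) for x in group if x == node)
  nodes.map (fun node =>
    (node, String.ofList (PySem.Chars.join ", ".toList
      ((PySem.List.enumerate groups 1).flatMap
        (fun p => (p.2.filter (fun x => x == node)).map (fun _ => PySem.Int.toChars p.1))))))

-- ===== PRECONDITION & SPEC =====
def Spec_build_node_group_list_py (groups : List (List String)) (out : List (String × String)) : Prop := out = build_node_group_list_py_alt groups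
instance (groups : List (List String)) (out : List (String × String)) : Decidable (Spec_build_node_group_list_py groups out) := by unfold Spec_build_node_group_list_py; infer_instance

-- ===== CLAIM =====
def Claim_equal_build_node_group_list_py : Prop := ∀ (groups : List (List String)), Dom_build_node_group_list_py groups → Spec_build_node_group_list_py groups (build_node_group_list_py groups)

-- ===== LEMMAS AND PROOFS =====

-- the flattened stream of (node, rendered index) events both programs conceptually process
def pvStream (groups : List (List String)) : List (String × List Char) :=
  (PySem.List.enumerate groups 1).flatMap
    (fun p => p.2.map (fun n => (n, PySem.Int.toChars p.1)))

-- B's collect dict over the stream (setdefault-append shape)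
def pvCollect (s : List (String × List Char)) : PySem.Dict String (List (List Char)) :=
  s.foldl (fun d p => d.modify p.1 [] (· ++ [p.2])) PySem.Dict.empty

-- join with the separator ", "
def pvJoinC (vs : List (List Char)) : List Char := PySem.Chars.join ", ".toList vs

-- A's dict is the collect dict with every value list joined
def pvMapJoin (d : PySem.Dict String (List (List Char))) : PySem.Dict String (List Char) :=
  PySem.Dict.mk (d.items.map (fun p => (p.1, pvJoinC p.2)))

-- every value list the collect dict maintains is nonempty
def pvInvNE (d : PySem.Dict String (List (List Char))) : Prop := ∀ p ∈ d.items, p.2 ≠ ([] : List (List Char))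

theorem pvJoinC_snoc (vs : List (List Char)) (x : List Char) (h : vs ≠ []) :
    pvJoinC (vs ++ [x]) = pvJoinC vs ++ (", ".toList ++ x) := by
  induction vs with
  | nil => exact absurd rfl h
  | cons a t ih =>
    cases t with
    | nil => simp [pvJoinC, PySem.Chars.join_cons_cons, PySem.Chars.join_singleton]
    | cons b r =>
      simp only [List.cons_append, pvJoinC, PySem.Chars.join_cons_cons] at *
      rw [ih (by simp)]
      simp [List.append_assoc]

theorem pvGet?_mapJoin (d : PySem.Dict String (List (List Char))) (k : String) :
    (pvMapJoin d).get? k = (d.get? k).map pvJoinC := by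
  obtain ⟨l⟩ := d
  induction l with
  | nil => simp [pvMapJoin, PySem.Dict.get?]
  | cons p t ih =>
    obtain ⟨pk, pv⟩ := p
    by_cases h : pk == k
    · simp [pvMapJoin, PySem.Dict.get?_mk_cons, h]
    · simp only [pvMapJoin, List.map_cons, PySem.Dict.get?_mk_cons, h] at *
      simpa using ih

theorem pvMapJoin_insert (d : PySem.Dict String (List (List Char))) (k : String) (v : List (List Char)) :
    pvMapJoin (d.insert k v) = (pvMapJoin d).insert k (pvJoinC v) := by
  obtain ⟨l⟩ := d
  have hc : ({ items := l.map (fun p => (p.1, pvJoinC p.2)) } : PySem.Dict String (List Char)).contains k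
      = ({ items := l } : PySem.Dict String (List (List Char))).contains k := by
    simp [PySem.Dict.contains_mk, List.any_map, Function.comp_def]
  apply PySem.Dict.ext
  simp only [pvMapJoin, PySem.Dict.items_insert, hc]
  split_ifs with h
  · simp only [List.map_map]
    refine List.map_congr_left (fun p hp => ?_)
    simp only [Function.comp_apply]
    split_ifs with h2
    · simp
    · simp
  · simp

-- one inner step: A's branch on (pvMapJoin d) mirrors the modify on d
theorem pvStep (d : PySem.Dict String (List (List Char))) (node : String) (ic : List Char)
    (hinv : pvInvNE d) :
    (match (pvMapJoin d).get? node with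
      | none => (pvMapJoin d).insert node ic
      | some s => (pvMapJoin d).insert node (s ++ (", ".toList ++ ic)))
      = pvMapJoin (d.modify node [] (· ++ [ic]))
    ∧ pvInvNE (d.modify node [] (· ++ [ic])) := by
  have hmod : d.modify node [] (· ++ [ic]) = d.insert node (d.getD node [] ++ [ic]) := rfl
  constructor
  · rw [pvGet?_mapJoin, hmod, pvMapJoin_insert]
    cases hg : d.get? node with
    | none =>
      simp [PySem.Dict.getD_of_get?_eq_none _ _ hg, pvJoinC, PySem.Chars.join_singleton]
    | some vs =>
      have hne : vs ≠ [] := hinv _ (PySem.Dict.mem_items_of_get?_eq_some _ hg)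
      simp [PySem.Dict.getD_of_get?_eq_some _ _ hg, pvJoinC_snoc vs ic hne]
  · intro p hp
    rw [hmod] at hp
    rcases (PySem.Dict.mem_items_insert _ _ _ _).1 hp with h | h
    · subst h; simp
    · exact hinv p h.1

-- the inner loop over one group
theorem pvInner (group : List String) (d : PySem.Dict String (List (List Char))) (index : Int)
    (hinv : pvInvNE d) :
    group.foldl
      (fun d node =>
        match d.get? node with
        | none => d.insert node (PySem.Int.toChars index)
        | some s => d.insert node (s ++ (", ".toList ++ PySem.Int.toChars index)))
      (pvMapJoin d)
      = pvMapJoin (group.foldl (fun d node => d.modify node [] (· ++ [PySem.Int.toChars index])) d)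
    ∧ pvInvNE (group.foldl (fun d node => d.modify node [] (· ++ [PySem.Int.toChars index])) d) := by
  induction group generalizing d with
  | nil => exact ⟨rfl, hinv⟩
  | cons node rest ih =>
    obtain ⟨h1, h2⟩ := pvStep d node (PySem.Int.toChars index) hinv
    simp only [List.foldl_cons]
    rw [h1]
    exact ih _ h2

-- the outer loop: A's running counter against the enumerate-driven collect fold
theorem pvOuter (groups : List (List String)) (i : Int) (d : PySem.Dict String (List (List Char)))
    (hinv : pvInvNE d) :
    (groups.foldl
      (fun (st : PySem.Dict String (List Char) × Int) group =>
        let index := st.2 + 1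
        let d' := group.foldl
          (fun d node =>
            match d.get? node with
            | none => d.insert node (PySem.Int.toChars index)
            | some s => d.insert node (s ++ (", ".toList ++ PySem.Int.toChars index)))
          st.1
        (d', index))
      (pvMapJoin d, i)).1
      = pvMapJoin ((PySem.List.enumerate groups (i + 1)).foldl
          (fun d (p : Int × List String) =>
            p.2.foldl (fun d node => d.modify node [] (· ++ [PySem.Int.toChars p.1])) d)
          d) := by
  induction groups generalizing i d with
  | nil => rfl
  | cons g rest ih =>
    rw [PySem.List.enumerate_cons]
    simp only [List.foldl_cons]
    obtain ⟨h1, h2⟩ := pvInner g d (i + 1) hinv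
    rw [h1]
    exact ih (i + 1) _ h2

-- the nested collect fold is the single fold over the flattened stream
theorem pvNested_eq_stream (ps : List (Int × List String)) (d : PySem.Dict String (List (List Char))) :
    ps.foldl
      (fun d (p : Int × List String) =>
        p.2.foldl (fun d node => d.modify node [] (· ++ [PySem.Int.toChars p.1])) d) d
    = (ps.flatMap (fun p => p.2.map (fun n => (n, PySem.Int.toChars p.1)))).foldl
        (fun d q => d.modify q.1 [] (· ++ [q.2])) d := by
  induction ps generalizing d with
  | nil => rfl
  | cons p t ih =>
    simp only [List.foldl_cons, List.flatMap_cons, List.foldl_append, List.foldl_map]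
    exact ih _

-- the stream's first components are the flattened groups
theorem pvStream_map_fst (groups : List (List String)) :
    (pvStream groups).map Prod.fst = groups.flatMap (fun g => g) := by
  unfold pvStream
  rw [List.map_flatMap]
  simp only [List.map_map, Function.comp_def, List.map_id']
  rw [List.flatMap_def, List.flatMap_def, PySem.List.map_snd_enumerate, List.map_id']

-- items of the collect dict, fully characterised: distinct keys in first-occurrence
-- order, each paired with the values of its stream events in order
theorem pvCollect_items (s : List (String × List Char)) :
    (pvCollect s).items
      = (PySem.Set.ofList (s.map Prod.fst)).map
          (fun k => (k, (s.filter (fun q => q.1 == k)).map (fun q => q.2))) := by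
  induction s using List.reverseRecOn with
  | nil => rfl
  | append_singleton s p ih =>
    have hmod : pvCollect (s ++ [p])
        = (pvCollect s).insert p.1 ((pvCollect s).getD p.1 [] ++ [p.2]) := by
      unfold pvCollect
      rw [List.foldl_append]
      rfl
    have hgd : (pvCollect s).getD p.1 [] = (s.filter (fun q => q.1 == p.1)).map (fun q => q.2) := by
      unfold pvCollect
      rw [PySem.Dict.getD_foldl_modify_append]
      rfl
    have hkeys : (pvCollect s).keys = PySem.Set.ofList (s.map Prod.fst) := by
      unfold pvCollect
      rw [PySem.Dict.keys_foldl_modify_key s Prod.fst [] (fun _ p => (· ++ [p.2]))]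
      rfl
    have hof : PySem.Set.ofList ((s ++ [p]).map Prod.fst)
        = PySem.Set.add (PySem.Set.ofList (s.map Prod.fst)) p.1 := by
      rw [List.map_append, PySem.Set.ofList_eq_foldl, PySem.Set.ofList_eq_foldl, List.foldl_append]
      rfl
    rw [hmod, hof]
    by_cases hm : p.1 ∈ PySem.Set.ofList (s.map Prod.fst)
    · have hc : (pvCollect s).contains p.1 = true := by
        rw [PySem.Dict.contains_eq_decide_mem_keys, hkeys]; simpa using hm
      rw [PySem.Dict.items_insert, hc, if_pos rfl, ih, PySem.Set.add_of_mem hm, List.map_map]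
      refine List.map_congr_left (fun k hk => ?_)
      simp only [Function.comp_apply]
      by_cases hkp : k = p.1
      · subst hkp
        simp [hgd, List.filter_append]
      · have h1 : (k == p.1) = false := by simp [hkp]
        have h2 : (p.1 == k) = false := by simp [Ne.symm hkp]
        simp [h1, h2, List.filter_append]
    · have hc : (pvCollect s).contains p.1 = false := by
        rw [PySem.Dict.contains_eq_decide_mem_keys, hkeys]; simpa using hm
      rw [PySem.Dict.items_insert, hc, if_neg (by simp), ih, PySem.Set.add_of_not_mem hm,
        List.map_append]
      congr 1
      · refine List.map_congr_left (fun k hk => ?_)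
        have hkp : k ≠ p.1 := fun h => hm (h ▸ hk)
        have h2 : (p.1 == k) = false := by simp [Ne.symm hkp]
        simp [h2, List.filter_append]
      · simp [hgd, List.filter_append]

-- per node, B's generator expression is the filtered stream's values
theorem pvFilteredStream (groups : List (List String)) (node : String) :
    ((pvStream groups).filter (fun q => q.1 == node)).map (fun q => q.2)
      = (PySem.List.enumerate groups 1).flatMap
          (fun p => (p.2.filter (fun x => x == node)).map (fun _ => PySem.Int.toChars p.1)) := by
  unfold pvStream
  rw [List.filter_flatMap, List.map_flatMap]
  simp [List.filter_map, List.map_map, Function.comp_def]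

-- ===== VERDICT =====
theorem build_node_group_list_py_spec : Claim_equal_build_node_group_list_py := by
  intro groups _
  unfold Spec_build_node_group_list_py build_node_group_list_py build_node_group_list_py_alt
  have h := pvOuter groups 0 PySem.Dict.empty (by intro p hp; cases hp)
  have he : pvMapJoin PySem.Dict.empty = PySem.Dict.empty := rfl
  rw [he] at h
  simp only [zero_add] at h
  rw [pvNested_eq_stream (PySem.List.enumerate groups 1) PySem.Dict.empty] at h
  have hn : ((PySem.List.enumerate groups 1).flatMap
      (fun p => p.2.map (fun n => (n, PySem.Int.toChars p.1)))).foldl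
      (fun d q => d.modify q.1 [] (· ++ [q.2])) PySem.Dict.empty = pvCollect (pvStream groups) := rfl
  rw [hn] at h
  simp only [h, pvMapJoin, PySem.List.dedup_eq_ofList]
  rw [pvCollect_items, List.map_map, List.map_map, pvStream_map_fst]
  refine List.map_congr_left (fun node hnode => ?_)
  simp only [Function.comp_apply]
  rw [pvFilteredStream]
  rfl
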